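-- pv_equiv track=rewrite | github.com/joey101/engg1811 | engg1811/EXAM/ENGG1811-21T1-exam/q1.py | q1_funct
-- ===== SOURCE A (Python) =====
-- def   q1_funct (a_list):
--     second = []
--
--     for num in a_list:
--         if num > 0:
--             second.append(num)
--
--     if not second:
--         return 0
--     return min(second)
-- ===== SOURCE B (Python) =====
-- def q1_funct(a_list):
--     best = None
--     for num in a_list:
--         if num > 0 and (best is None or num < best):
--             best = num
--     return 0 if best is None else best
-- ===== Notes on version B (the rewrite author's own statement) =====
-- stated objective: simpler
-- what changed: B replaces A's build-a-positives-list-then-min() two-pass shape with a single fold keeping a running minimum of positive elements in one Optional accumulator.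
import Mathlib
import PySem

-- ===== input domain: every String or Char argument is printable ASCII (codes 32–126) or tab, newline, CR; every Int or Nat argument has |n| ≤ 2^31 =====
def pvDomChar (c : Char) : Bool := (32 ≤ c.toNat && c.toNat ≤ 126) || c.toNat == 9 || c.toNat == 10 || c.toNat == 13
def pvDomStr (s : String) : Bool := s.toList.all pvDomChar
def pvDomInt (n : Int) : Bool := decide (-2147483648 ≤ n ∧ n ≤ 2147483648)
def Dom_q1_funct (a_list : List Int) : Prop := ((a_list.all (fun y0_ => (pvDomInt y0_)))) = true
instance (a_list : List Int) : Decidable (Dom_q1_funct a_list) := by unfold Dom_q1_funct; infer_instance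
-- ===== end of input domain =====

-- B replaces A's build-a-positives-list-then-min() two passes with one fold keeping a running minimum; same return value everywhere.

-- ===== PORT A =====
def q1_funct (a_list : List Int) : Int :=
  let second := a_list.foldl (fun second num => if num > 0 then second ++ [num] else second) []
  if second = [] then 0
  else (PySem.List.min? second (fun x => x)).getD 0

-- ===== PORT B =====
def q1_funct_alt (a_list : List Int) : Int :=
  let best := a_list.foldl
    (fun best num =>
      if num > 0 && (best.elim true (fun b => num < b)) then some num else best)
    (none : Option Int)
  match best with
  | none => 0
  | some b => b

-- ===== PRECONDITION & SPEC =====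
def Spec_q1_funct (a_list : List Int) (out : Int) : Prop := out = q1_funct_alt a_list
instance (a_list : List Int) (out : Int) : Decidable (Spec_q1_funct a_list out) := by unfold Spec_q1_funct; infer_instance

-- ===== CLAIM (what is proved, stated in full; the proofs are below) =====
def Claim_equal_q1_funct : Prop := ∀ (a_list : List Int), Dom_q1_funct a_list → Spec_q1_funct a_list (q1_funct a_list)

-- ===== LEMMAS AND PROOFS =====

-- A's appending loop builds exactly the positive filter of the input.
theorem pv_foldA (l : List Int) (acc : List Int) :
    l.foldl (fun second num => if num > 0 then second ++ [num] else second) acc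
      = acc ++ l.filter (fun num => num > 0) := by
  induction l generalizing acc with
  | nil => simp
  | cons x t ih =>
    by_cases h : x > 0 <;> simp [h, ih, List.append_assoc]

-- B's loop starting from a known best x computes the running minimum over the positives.
theorem pv_foldB_some (l : List Int) (x : Int) :
    l.foldl
        (fun best num =>
          if num > 0 && (best.elim true (fun b => num < b)) then some num else best)
        (some x)
      = some ((l.filter (fun num => num > 0)).foldl min x) := by
  induction l generalizing x with
  | nil => rfl
  | cons y t ih =>
    rw [List.foldl_cons, List.filter_cons]
    by_cases h : y > 0
    · by_cases h2 : y < x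
      · rw [if_pos (by simp [h, h2]), ih, if_pos (by simp [h]), List.foldl_cons]
        have hm : min x y = y := by omega
        rw [hm]
      · rw [if_neg (by simp [h2]), ih, if_pos (by simp [h]), List.foldl_cons]
        have hm : min x y = x := by omega
        rw [hm]
    · rw [if_neg (by simp [h]), ih, if_neg (by simp [h])]

-- B's loop from None: None if no positives, else the running minimum seeded by the first positive.
theorem pv_foldB_none (l : List Int) :
    l.foldl
        (fun best num =>
          if num > 0 && (best.elim true (fun b => num < b)) then some num else best)
        (none : Option Int)
      = match l.filter (fun num => num > 0) with
        | [] => none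
        | x :: t => some (t.foldl min x) := by
  induction l with
  | nil => rfl
  | cons y t ih =>
    rw [List.foldl_cons, List.filter_cons]
    by_cases h : y > 0
    · rw [if_pos (by simp [h]), pv_foldB_some, if_pos (by simp [h])]
    · rw [if_neg (by simp [h]), ih, if_neg (by simp [h])]

-- ===== VERDICT (by name: the statement is the Claim_ definition above) =====
theorem q1_funct_spec : Claim_equal_q1_funct := by
  intro a_list _
  unfold Spec_q1_funct q1_funct q1_funct_alt
  rw [pv_foldA, pv_foldB_none]
  cases h : a_list.filter (fun num => num > 0) with
  | nil => simp
  | cons x t => simp [PySem.List.min?_id_cons]
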